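-- pv_equiv track=rewrite | github.com/seanwoori/TIL | handouts/02/230224/exam/16650/16650.py | mn
-- ===== SOURCE A (Python) =====
-- def mn(l):
--
--
--     for i in range(len(l)-1):
--         # ,in 일때, lst[i]가 min(lst[i+1:j]) 보다 작으면 for loop 시작
--         # min값이 0이면, temp에 lst를 복사하여 0을 지우면서 다음 min값을 찾음.
--         if min(l[i+1:]) == 0:
--             temp = list(set(l[i+1:]))
--             temp.remove(0)
--             if temp == l[i+1:]:
--                 return l
--             else:
--                 mnval = min(temp)
--         else:
--             mnval=min(l[i+1:])
--
--         if l[i]>mnval and mnval!=0: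
--             # 가장 낮은 자리수에 있는 것과 교환
--             for j in range(i+1, len(l)):
--                 if l[j]==mnval:
--                     l[i],l[j]=l[j],l[i]
--                     return l
--     return l
-- ===== SOURCE B (Python) =====
-- def mn(l):
--     # One right-to-left pass precomputes suffix minima and suffix smallest-nonzero
--     # values, then a single left-to-right scan finds the swap: O(n) vs A's O(n^2).
--     n = len(l)
--     smin = [None] * (n + 1)   # smin[k] = min(l[k:]) or None
--     nzmin = [None] * (n + 1)  # nzmin[k] = min of nonzero elements of l[k:]  or None
--     for k in range(n - 1, -1, -1):
--         smin[k] = l[k] if smin[k + 1] is None else min(l[k], smin[k + 1])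
--         if l[k] != 0:
--             nzmin[k] = l[k] if nzmin[k + 1] is None else min(l[k], nzmin[k + 1])
--         else:
--             nzmin[k] = nzmin[k + 1]
--     for i in range(n - 1):
--         key = smin[i + 1] if smin[i + 1] != 0 else nzmin[i + 1]
--         if key is not None and l[i] > key:
--             j = l.index(key, i + 1)
--             l[i], l[j] = l[j], l[i]
--             return l
--     return l
-- ===== Notes on version B (the rewrite author's own statement) =====
-- stated objective: faster
-- what changed: A recomputes min(l[i+1:]) (and a set copy with 0 removed) from scratch at every index, which is O(n^2); B precomputes suffix-minimum and suffix-smallest-nonzero arrays in one right-to-left pass and finds the swap in a single forward scan, O(n).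
import Mathlib
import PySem

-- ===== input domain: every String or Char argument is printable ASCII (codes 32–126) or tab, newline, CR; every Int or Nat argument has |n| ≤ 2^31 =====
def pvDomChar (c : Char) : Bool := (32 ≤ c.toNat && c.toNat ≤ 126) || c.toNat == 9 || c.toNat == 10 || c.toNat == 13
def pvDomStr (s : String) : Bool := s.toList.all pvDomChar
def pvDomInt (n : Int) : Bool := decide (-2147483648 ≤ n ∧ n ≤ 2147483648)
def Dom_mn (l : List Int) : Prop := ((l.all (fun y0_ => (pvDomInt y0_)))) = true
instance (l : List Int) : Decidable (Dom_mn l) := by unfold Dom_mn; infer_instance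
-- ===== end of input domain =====

-- B replaces A's per-index rescans of the suffix (min / set / remove) by one right-to-left
-- pass precomputing suffix minima and suffix smallest-nonzero values, then a single scan:
-- O(n) instead of O(n^2).  Both A and B mutate l in place in Python; the equivalence proved
-- here is about the RETURN value (B performs the same single swap as A).

-- ===== PORT A =====
-- inner loop: for j in range(i+1, len(l)): if l[j]==mnval: l[i],l[j]=l[j],l[i]; return l
-- (none = the inner loop fell through without returning)
def mnSwap (l : List Int) (i : Nat) (mnval : Int) (j : Nat) : Option (List Int) :=
  if hlt : j < l.length then
    if l.getD j 0 = mnval then some ((l.set i (l.getD j 0)).set j (l.getD i 0))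
    else mnSwap l i mnval (j + 1)
  else none
termination_by l.length - j

-- outer loop: for i in range(len(l)-1)
def mnLoop (l : List Int) (i : Nat) : List Int :=
  if _h : i + 1 < l.length then
    let s := l.drop (i + 1)                           -- l[i+1:]
    match PySem.List.min? s (fun x => x) with
    | none => l                                       -- unreachable: s ≠ [] when i+1 < len l
    | some m =>
      -- mnval? = none encodes both 'return l' at 'temp == l[i+1:]' and the ValueError of
      -- min([]) (outside Pre_mn); in both cases the Python yields no swap and we return l.
      let mnval? : Option Int :=
        if m = 0 then
          -- temp = list(set(l[i+1:])); temp.remove(0)  — the comparison 'temp == l[i+1:]'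
          -- is False for every element order of the set (temp lacks the 0 that s contains),
          -- and min(temp) ignores order, so Set.ofList's first-occurrence order is exact here.
          match PySem.List.remove? (PySem.Set.ofList s) 0 with
          | none => none                              -- unreachable: 0 ∈ s when min s = 0
          | some temp =>
            if temp = s then none
            else PySem.List.min? temp (fun x => x)    -- none = ValueError (outside Pre_mn)
        else some m
      match mnval? with
      | none => l
      | some mnval =>
        if l.getD i 0 > mnval ∧ mnval ≠ 0 then
          match mnSwap l i mnval (i + 1) with
          | some r => r
          | none => mnLoop l (i + 1)
        else mnLoop l (i + 1)
  else l
termination_by l.length - i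

def mn (l : List Int) : List Int := mnLoop l 0

-- ===== PORT B =====
-- right-to-left pass of Source B: returns (smin, nzmin), each of length l.length + 1;
-- entry k is min(l[k:]) resp. min of the nonzero elements of l[k:] (none = Python None)
def sufArr (l : List Int) : List (Option Int) × List (Option Int) :=
  match l with
  | [] => ([none], [none])
  | x :: xs =>
    let p := sufArr xs
    let s : Option Int :=
      match p.1.getD 0 none with
      | none => some x
      | some m => some (min x m)
    let z : Option Int :=
      if x ≠ 0 then
        match p.2.getD 0 none with
        | none => some x
        | some m => some (min x m)
      else p.2.getD 0 none
    (s :: p.1, z :: p.2)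

-- forward scan of Source B: for i in range(n-1), key = smin[i+1] if smin[i+1] != 0 else nzmin[i+1]
def mnScan (l : List Int) (sm nz : List (Option Int)) (i : Nat) : List Int :=
  if _h : i + 1 < l.length then
    let key? : Option Int :=
      match sm.getD (i + 1) none with
      | some m => if m ≠ 0 then some m else nz.getD (i + 1) none
      | none => none
    match key? with
    | some k =>
      if l.getD i 0 > k then
        match PySem.List.index? (l.drop (i + 1)) k with   -- l.index(key, i+1)
        | some j0 => (l.set i (l.getD (i + 1 + j0) 0)).set (i + 1 + j0) (l.getD i 0)
        | none => l                                       -- unreachable: key ∈ l[i+1:]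
      else mnScan l sm nz (i + 1)
    | none => mnScan l sm nz (i + 1)
  else l
termination_by l.length - i

def mn_alt (l : List Int) : List Int :=
  mnScan l (sufArr l).1 (sufArr l).2 0

-- ===== PRECONDITION & SPEC =====
-- the key A computes at index i: min(l[i+1:]), replaced by the smallest nonzero suffix
-- element when that min is 0 (none = no such element, where A's min([]) raises)
def keyAt (l : List Int) (i : Nat) : Option Int :=
  let s := l.drop (i + 1)
  match PySem.List.min? s (fun x => x) with
  | none => none
  | some m =>
    if m = 0 then PySem.List.min? (s.filter (fun x => decide (x ≠ 0))) (fun x => x)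
    else some m

def swapB (l : List Int) (i : Nat) : Bool :=
  match keyAt l i with
  | some k => decide (l.getD i 0 > k)
  | none => false

-- A raises ValueError exactly when its scan reaches an index whose suffix consists only of
-- zeros without having performed a swap at any earlier index.
def raiseCond (l : List Int) : Prop :=
  ∃ i < l.length - 1, (∀ x ∈ l.drop (i + 1), x = 0) ∧ ∀ i' < i, swapB l i' = false

-- Pre_mn excludes exactly the inputs on which A raises ValueError ('min() arg is an empty
-- sequence'); on those inputs B simply returns l (no beneficial swap exists).
def Pre_mn (l : List Int) : Prop := ¬ raiseCond l
instance (l : List Int) : Decidable (Pre_mn l) := by unfold Pre_mn raiseCond; infer_instance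

def pvWitness_mn : List Int := [3, 1, 2]

def Spec_mn (l : List Int) (out : List Int) : Prop := out = mn_alt l
instance (l : List Int) (out : List Int) : Decidable (Spec_mn l out) := by unfold Spec_mn; infer_instance

-- ===== CLAIM (what is proved, stated in full; the proofs are below) =====
def Claim_equal_mn : Prop := ∀ (l : List Int), Dom_mn l → Pre_mn l → Spec_mn l (mn l)

-- ===== LEMMAS AND PROOFS =====


theorem foldl_min_eq (t : List Int) (x : Int) :
    t.foldl min x = match PySem.List.min? t (fun y => y) with | none => x | some m => min x m := by
  induction t generalizing x with
  | nil => simp [PySem.List.min?]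
  | cons y t ih =>
    rw [PySem.List.min?_id_cons]
    simp only [List.foldl_cons]
    rw [ih (min x y), ih y]
    cases h : PySem.List.min? t (fun y => y) with
    | none => simp
    | some m => simp [min_assoc]

theorem min?_id_cons' (x : Int) (t : List Int) :
    PySem.List.min? (x :: t) (fun y => y) =
      some (match PySem.List.min? t (fun y => y) with | none => x | some m => min x m) := by
  rw [PySem.List.min?_id_cons, foldl_min_eq]

-- two lists with the same members have the same minimum (no-key case)
theorem min?_congr_mem (a b : List Int) (h : ∀ x, x ∈ a ↔ x ∈ b) :
    PySem.List.min? a (fun y => y) = PySem.List.min? b (fun y => y) := by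
  cases ha : PySem.List.min? a (fun y => y) with
  | none =>
    rw [PySem.List.min?_eq_none_iff] at ha
    subst ha
    cases hb : PySem.List.min? b (fun y => y) with
    | none => rfl
    | some mb =>
      have := PySem.List.min?_mem hb
      rw [← h] at this
      simp at this
  | some ma =>
    cases hb : PySem.List.min? b (fun y => y) with
    | none =>
      rw [PySem.List.min?_eq_none_iff] at hb
      subst hb
      have := PySem.List.min?_mem ha
      rw [h] at this
      simp at this
    | some mb =>
      have hma := PySem.List.min?_mem ha
      have hmb := PySem.List.min?_mem hb
      have h1 := PySem.List.min?_isMin ha mb ((h mb).2 hmb)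
      have h2 := PySem.List.min?_isMin hb ma ((h ma).1 hma)
      simp only [Option.some.injEq]
      omega

-- Source B's arrays really hold the suffix minima / suffix smallest-nonzero values
theorem sufArr_spec (l : List Int) (k : Nat) :
    (sufArr l).1.getD k none = PySem.List.min? (l.drop k) (fun y => y) ∧
    (sufArr l).2.getD k none =
      PySem.List.min? ((l.drop k).filter (fun x => decide (x ≠ 0))) (fun y => y) := by
  induction l generalizing k with
  | nil => cases k <;> simp [sufArr, PySem.List.min?]
  | cons x xs ih =>
    cases k with
    | succ k => simpa [sufArr] using ih k
    | zero =>
      have h0 := ih 0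
      simp only [List.drop_zero] at h0
      constructor
      · simp only [sufArr, List.getD_cons_zero, List.drop_zero, h0.1]
        rw [min?_id_cons']
        cases PySem.List.min? xs (fun y => y) <;> rfl
      · simp only [sufArr, List.getD_cons_zero, List.drop_zero, h0.2]
        by_cases hx : x = 0
        · subst hx; simp
        · simp only [hx, ne_eq, not_false_iff, if_true, List.filter_cons, decide_eq_true_eq]
          rw [min?_id_cons']
          cases PySem.List.min? (xs.filter (fun x => decide (x ≠ 0))) (fun y => y) <;> rfl

-- A's inner scan for the first j ≥ i+1 with l[j] = v IS l.index(v, i+1)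
theorem mnSwap_eq_index? (l : List Int) (i : Nat) (v : Int) (j : Nat) :
    mnSwap l i v j = (PySem.List.index? (l.drop j) v).map
      (fun j0 => (l.set i (l.getD (j + j0) 0)).set (j + j0) (l.getD i 0)) := by
  rw [mnSwap]
  by_cases h : j < l.length
  · rw [dif_pos h]
    have hdrop : l.drop j = l[j] :: l.drop (j + 1) := List.drop_eq_getElem_cons h
    rw [hdrop]
    by_cases he : l.getD j 0 = v
    · have : l[j] = v := by rw [← he]; simp [h]
      rw [if_pos he, this, PySem.List.index?_cons_self]
      simp
    · have hne : l[j] ≠ v := by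
        intro hc; apply he; rw [← hc]; simp [h]
      rw [if_neg he, PySem.List.index?_cons_of_ne _ hne, mnSwap_eq_index?]
      cases PySem.List.index? (l.drop (j + 1)) v with
      | none => rfl
      | some j0 =>
        simp only [Option.map_some]
        have : j + (j0 + 1) = j + 1 + j0 := by omega
        simp [this]
  · rw [dif_neg h]
    have : l.drop j = [] := List.drop_eq_nil_of_le (by omega)
    rw [this]
    simp [PySem.List.index?]
termination_by l.length - j

theorem min?_all_zero (s : List Int) (hne : s ≠ []) (hz : ∀ x ∈ s, x = 0) :
    PySem.List.min? s (fun y => y) = some 0 := by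
  cases h : PySem.List.min? s (fun y => y) with
  | none => exact absurd ((PySem.List.min?_eq_none_iff s _).mp h) hne
  | some m => rw [hz m (PySem.List.min?_mem h)]

theorem mem_drop_succ {l : List Int} {i : Nat} {x : Int} (hx : x ∈ l.drop (i + 1)) :
    x ∈ l.drop i := by
  have h1 : (l.drop i).drop 1 = l.drop (i + 1) := List.drop_drop
  rw [← h1] at hx
  exact List.mem_of_mem_drop hx

-- once the remaining suffix is all zeros, B's scan runs to the end and returns l
theorem mnScan_all_zero (l : List Int) (sm nz : List (Option Int)) (i : Nat)
    (hsm : ∀ k, sm.getD k none = PySem.List.min? (l.drop k) (fun y => y))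
    (hnz : ∀ k, nz.getD k none =
      PySem.List.min? ((l.drop k).filter (fun x => decide (x ≠ 0))) (fun y => y))
    (hz : ∀ x ∈ l.drop i, x = 0) : mnScan l sm nz i = l := by
  rw [mnScan]
  by_cases h : i + 1 < l.length
  · rw [dif_pos h]
    have hz' : ∀ x ∈ l.drop (i + 1), x = 0 := fun x hx => hz x (mem_drop_succ hx)
    have hne : l.drop (i + 1) ≠ [] := by
      intro hc
      have := congrArg List.length hc
      simp [List.length_drop] at this
      omega
    have h1 : sm.getD (i + 1) none = some 0 := by rw [hsm]; exact min?_all_zero _ hne hz'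
    have h2 : nz.getD (i + 1) none = none := by
      rw [hnz]
      have : (l.drop (i + 1)).filter (fun x => decide (x ≠ 0)) = [] := by
        rw [List.filter_eq_nil_iff]
        intro x hx
        simp [hz' x hx]
      rw [this]
      exact (PySem.List.min?_eq_none_iff _ _).mpr rfl
    simp only [h1, h2, ne_eq, not_true_eq_false, if_false]
    exact mnScan_all_zero l sm nz (i + 1) hsm hnz hz'
  · rw [dif_neg h]
termination_by l.length - i

theorem mnLoop_eq_mnScan (l : List Int) (i : Nat) :
    mnLoop l i = mnScan l (sufArr l).1 (sufArr l).2 i := by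
  rw [mnLoop, mnScan]
  by_cases h : i + 1 < l.length
  · rw [dif_pos h, dif_pos h]
    have hne : l.drop (i + 1) ≠ [] := by
      intro hc
      have := congrArg List.length hc
      simp [List.length_drop] at this
      omega
    cases hm : PySem.List.min? (l.drop (i + 1)) (fun x => x) with
    | none => exact absurd ((PySem.List.min?_eq_none_iff _ _).mp hm) hne
    | some m =>
      have hsm : (sufArr l).1.getD (i + 1) none = some m := by
        rw [(sufArr_spec l (i + 1)).1, hm]
      have hnz : (sufArr l).2.getD (i + 1) none =
          PySem.List.min? ((l.drop (i + 1)).filter (fun x => decide (x ≠ 0))) (fun x => x) :=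
        (sufArr_spec l (i + 1)).2
      simp only [hm, hsm]
      by_cases hm0 : m = 0
      · subst hm0
        have h0mem : (0 : Int) ∈ l.drop (i + 1) := PySem.List.min?_mem hm
        have hrem : PySem.List.remove? (PySem.Set.ofList (l.drop (i + 1))) 0 =
            some ((PySem.Set.ofList (l.drop (i + 1))).erase 0) :=
          PySem.List.remove?_eq_some_erase _ 0 ((PySem.Set.mem_ofList _ 0).mpr h0mem)
        have hmemT : ∀ x : Int, x ∈ (PySem.Set.ofList (l.drop (i + 1))).erase 0 ↔
            x ∈ (l.drop (i + 1)).filter (fun x => decide (x ≠ 0)) := by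
          intro x
          rw [List.Nodup.mem_erase_iff (PySem.Set.nodup_ofList _), PySem.Set.mem_ofList,
            List.mem_filter]
          simp only [decide_eq_true_eq, ne_eq]
          tauto
        have htne : (PySem.Set.ofList (l.drop (i + 1))).erase 0 ≠ l.drop (i + 1) := by
          intro hc
          have h0T : (0 : Int) ∈ (PySem.Set.ofList (l.drop (i + 1))).erase 0 := by
            rw [hc]; exact h0mem
          have := (hmemT 0).mp h0T
          simp at this
        have hminT : PySem.List.min? ((PySem.Set.ofList (l.drop (i + 1))).erase 0) (fun x => x) =
            PySem.List.min? ((l.drop (i + 1)).filter (fun x => decide (x ≠ 0))) (fun x => x) :=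
          min?_congr_mem _ _ hmemT
        simp only [hrem, if_neg htne, hminT, ne_eq, not_true_eq_false, if_false, if_true,
          hnz]
        cases hk : PySem.List.min? ((l.drop (i + 1)).filter (fun x => decide (x ≠ 0)))
            (fun x => x) with
        | none =>
          rw [PySem.List.min?_eq_none_iff] at hk
          have hz : ∀ x ∈ l.drop (i + 1), x = 0 := by
            intro x hx
            by_contra hx0
            have : x ∈ (l.drop (i + 1)).filter (fun x => decide (x ≠ 0)) :=
              List.mem_filter.mpr ⟨hx, by simpa using hx0⟩
            rw [hk] at this
            simp at this
          exact (mnScan_all_zero l _ _ (i + 1) (fun k => (sufArr_spec l k).1)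
            (fun k => (sufArr_spec l k).2) hz).symm
        | some k =>
          have hkmem := PySem.List.min?_mem hk
          rw [List.mem_filter] at hkmem
          have hks : k ∈ l.drop (i + 1) := hkmem.1
          have hk0 : k ≠ 0 := by simpa using hkmem.2
          simp only []
          by_cases hgt : l.getD i 0 > k
          · rw [if_pos ⟨hgt, hk0⟩, if_pos hgt]
            obtain ⟨j0, hj0⟩ := Option.isSome_iff_exists.mp
              ((PySem.List.index?_isSome_iff _ _).mpr hks)
            rw [mnSwap_eq_index?, hj0]
            rfl
          · rw [if_neg (fun hc => hgt hc.1), if_neg hgt]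
            exact mnLoop_eq_mnScan l (i + 1)
      · simp only [if_neg hm0, if_pos hm0, ne_eq]
        have hms : m ∈ l.drop (i + 1) := PySem.List.min?_mem hm
        by_cases hgt : l.getD i 0 > m
        · rw [if_pos ⟨hgt, hm0⟩, if_pos hgt]
          obtain ⟨j0, hj0⟩ := Option.isSome_iff_exists.mp
            ((PySem.List.index?_isSome_iff _ _).mpr hms)
          rw [mnSwap_eq_index?, hj0]
          rfl
        · rw [if_neg (fun hc => hgt hc.1), if_neg hgt]
          exact mnLoop_eq_mnScan l (i + 1)
  · rw [dif_neg h, dif_neg h]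
termination_by l.length - i
-- ===== VERDICT (by name: the statement is the Claim_ definition above) =====
theorem mn_spec : Claim_equal_mn := by
  intro l _ _
  unfold Spec_mn mn mn_alt
  exact mnLoop_eq_mnScan l 0
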